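-- pv_equiv track=rewrite | github.com/FuwaFuwaT1me/agent-bot | telegram_chat_bot/mobile_mcp.py | pick_tool_name
-- ===== SOURCE A (Python) =====
-- from typing import Any, Dict, List, Optional, Tuple
--
-- def pick_tool_name(tools: List[Dict[str, Any]], candidates: List[str]) -> Optional[str]:
--     available = {t.get("name", "") for t in tools}
--     for c in candidates:
--         if c in available:
--             return c
--     # Try case-insensitive match
--     lower_map = {str(name).lower(): name for name in available}
--     for c in candidates:
--         if c.lower() in lower_map:
--             return lower_map[c.lower()]
--     return None
-- ===== SOURCE B (Python) =====
-- from typing import Any, Dict, List, Optional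
--
-- def pick_tool_name(tools: List[Dict[str, Any]], candidates: List[str]) -> Optional[str]:
--     names = [t.get("name", "") for t in tools]
--     available = set(names)
--     by_lower = {}
--     for n in names:
--         by_lower.setdefault(n.lower(), n)
--     first_ci = None
--     for c in candidates:
--         if c in available:
--             return c
--         if first_ci is None:
--             first_ci = by_lower.get(c.lower())
--     return first_ci
-- ===== Notes on version B (the rewrite author's own statement) =====
-- stated objective: alternative
-- what changed: Merges A's two sequential scans of candidates into a single pass that returns exact hits immediately and remembers the first case-insensitive hit, with the lowercase index built first-wins (setdefault) over the name list instead of A's dict-comprehension over the set.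
-- outside the precondition, e.g. on pick_tool_name([{'name': 'A'}, {'name': 'a'}], ['b']): A returns None, B returns None
import Mathlib
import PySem

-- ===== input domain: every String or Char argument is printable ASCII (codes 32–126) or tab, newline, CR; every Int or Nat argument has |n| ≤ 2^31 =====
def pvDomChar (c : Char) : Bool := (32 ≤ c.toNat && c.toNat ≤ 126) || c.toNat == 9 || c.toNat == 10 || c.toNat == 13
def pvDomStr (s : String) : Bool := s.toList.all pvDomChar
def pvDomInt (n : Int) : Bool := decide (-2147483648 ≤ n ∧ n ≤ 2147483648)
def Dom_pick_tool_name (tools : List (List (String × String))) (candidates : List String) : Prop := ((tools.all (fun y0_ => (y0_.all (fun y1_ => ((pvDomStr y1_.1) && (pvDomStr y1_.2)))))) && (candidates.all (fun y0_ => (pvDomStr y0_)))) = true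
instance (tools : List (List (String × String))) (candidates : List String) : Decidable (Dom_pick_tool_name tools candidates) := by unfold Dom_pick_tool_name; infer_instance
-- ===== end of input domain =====

-- B merges A's two scans into a single pass over candidates with a remembered first
-- case-insensitive fallback, indexing lowercase names first-wins from the name list.

-- ===== PORT A =====
-- first for-loop of A: exact membership in the set of available names
def pvLoopExact (available : PySem.Set String) : List String → Option String
  | [] => none
  | c :: rest => if available.contains c then some c else pvLoopExact available rest

-- lower_map = {str(name).lower(): name for name in available} (iterating the set)
def pvLowerMap (available : PySem.Set String) : PySem.Dict String String :=
  available.foldl (fun d name => d.insert (PySem.Str.lower name) name) PySem.Dict.empty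

-- second for-loop of A: 'if c.lower() in lower_map: return lower_map[c.lower()]'
def pvLoopCI (lm : PySem.Dict String String) : List String → Option String
  | [] => none
  | c :: rest =>
    match lm.get? (PySem.Str.lower c) with
    | some v => some v
    | none => pvLoopCI lm rest

def pick_tool_name (tools : List (List (String × String))) (candidates : List String) : Option String :=
  let available : PySem.Set String :=
    PySem.Set.ofList (tools.map (fun t => (PySem.Dict.mk t).getD "name" ""))
  match pvLoopExact available candidates with
  | some c => some c
  | none => pvLoopCI (pvLowerMap available) candidates

-- ===== PORT B =====
-- by_lower = {} ; for n in names: by_lower.setdefault(n.lower(), n)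
def pvByLower (names : List String) : PySem.Dict String String :=
  names.foldl (fun d n => d.setdefault (PySem.Str.lower n) n) PySem.Dict.empty

-- single pass: return the first exact match at once; remember the first
-- case-insensitive hit (by_lower.get(c.lower())) in first_ci
def pvGoB (available : PySem.Set String) (lm : PySem.Dict String String)
    (firstCi : Option String) : List String → Option String
  | [] => firstCi
  | c :: rest =>
    if available.contains c then some c
    else
      pvGoB available lm
        (match firstCi with
         | some v => some v
         | none => lm.get? (PySem.Str.lower c))
        rest

def pick_tool_name_alt (tools : List (List (String × String))) (candidates : List String) : Option String :=
  let names := tools.map (fun t => (PySem.Dict.mk t).getD "name" "")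
  pvGoB (PySem.Set.ofList names) (pvByLower names) none candidates

-- ===== PRECONDITION & SPEC =====
-- Pre_ excludes tool lists containing two distinct names that are equal case-insensitively:
-- there A's lowercase->name dict is built by iterating a Python set, whose hash order is
-- not a function of the input, so A's returned name on such inputs is accidental.
def Pre_pick_tool_name (tools : List (List (String × String))) (candidates : List String) : Prop :=
  ∀ a ∈ tools.map (fun t => (PySem.Dict.mk t).getD "name" ""),
    ∀ b ∈ tools.map (fun t => (PySem.Dict.mk t).getD "name" ""),
      PySem.Str.lower a = PySem.Str.lower b → a = b

instance (tools : List (List (String × String))) (candidates : List String) : Decidable (Pre_pick_tool_name tools candidates) := by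
  unfold Pre_pick_tool_name; infer_instance

def pvWitness_pick_tool_name : (List (List (String × String))) × List String :=
  ([[("name", "echo")], [("name", "tap")]], ["Echo"])

def Spec_pick_tool_name (tools : List (List (String × String))) (candidates : List String) (out : Option String) : Prop := out = pick_tool_name_alt tools candidates
instance (tools : List (List (String × String))) (candidates : List String) (out : Option String) : Decidable (Spec_pick_tool_name tools candidates out) := by unfold Spec_pick_tool_name; infer_instance

-- ===== CLAIM (what is proved, stated in full; the proofs are below) =====
def Claim_equal_pick_tool_name : Prop := ∀ (tools : List (List (String × String))) (candidates : List String), Dom_pick_tool_name tools candidates → Pre_pick_tool_name tools candidates → Spec_pick_tool_name tools candidates (pick_tool_name tools candidates)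

-- ===== LEMMAS AND PROOFS =====

-- get? of the lower-map fold, for an arbitrary start dict
theorem pv_get?_lowerfold (L : List String) (d : PySem.Dict String String) (k : String) :
    (L.foldl (fun d n => d.insert (PySem.Str.lower n) n) d).get? k =
      ((L.reverse.find? (fun n => PySem.Str.lower n == k)).or (d.get? k)) := by
  induction L generalizing d with
  | nil => simp
  | cons n L ih =>
    simp only [List.foldl_cons, List.reverse_cons, List.find?_append, ih]
    cases h : L.reverse.find? (fun n => PySem.Str.lower n == k) with
    | some v => simp
    | none =>
      rw [PySem.Dict.get?_insert]
      by_cases hk : k = PySem.Str.lower n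
      · simp [List.find?, hk]
      · have hf : (PySem.Str.lower n == k) = false :=
          beq_eq_false_iff_ne.mpr (fun h => hk h.symm)
        simp [List.find?, hf, hk]

-- under the no-collision precondition, A's dict lookup equals B's list search
theorem pv_lookup_eq (names : List String)
    (hp : ∀ a ∈ names, ∀ b ∈ names, PySem.Str.lower a = PySem.Str.lower b → a = b)
    (k : String) :
    (pvLowerMap (PySem.Set.ofList names)).get? k
      = names.find? (fun n => PySem.Str.lower n == k) := by
  unfold pvLowerMap
  rw [pv_get?_lowerfold]
  simp only [PySem.Dict.get?_empty, Option.or_none]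
  cases hA : (PySem.Set.ofList names).reverse.find? (fun n => PySem.Str.lower n == k) with
  | some v =>
    have hvmem : v ∈ names := by
      have := List.mem_of_find?_eq_some hA
      rw [List.mem_reverse, PySem.Set.mem_ofList] at this
      exact this
    have hvk : PySem.Str.lower v = k := by
      have := List.find?_some hA
      simpa using this
    cases hB : names.find? (fun n => PySem.Str.lower n == k) with
    | some w =>
      have hwmem : w ∈ names := List.mem_of_find?_eq_some hB
      have hwk : PySem.Str.lower w = k := by
        have := List.find?_some hB
        simpa using this
      have : v = w := hp v hvmem w hwmem (hvk.trans hwk.symm)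
      simp [this]
    | none =>
      exfalso
      have := List.find?_eq_none.mp hB v hvmem
      simp [hvk] at this
  | none =>
    cases hB : names.find? (fun n => PySem.Str.lower n == k) with
    | some w =>
      exfalso
      have hwmem : w ∈ names := List.mem_of_find?_eq_some hB
      have hwk : PySem.Str.lower w = k := by
        have := List.find?_some hB
        simpa using this
      have hwmem' : w ∈ (PySem.Set.ofList names).reverse := by
        rw [List.mem_reverse, PySem.Set.mem_ofList]; exact hwmem
      have := List.find?_eq_none.mp hA w hwmem'
      simp [hwk] at this
    | none => rfl

-- get? of B's first-wins setdefault fold is the first list match (no precondition)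
theorem pv_get?_bylower (names : List String) (k : String) :
    (pvByLower names).get? k = names.find? (fun n => PySem.Str.lower n == k) := by
  unfold pvByLower
  have main : ∀ (L : List String) (d : PySem.Dict String String),
      (L.foldl (fun d n => d.setdefault (PySem.Str.lower n) n) d).get? k =
        (d.get? k).or (L.find? (fun n => PySem.Str.lower n == k)) := by
    intro L
    induction L with
    | nil => intro d; simp
    | cons n L ih =>
      intro d
      simp only [List.foldl_cons, ih]
      by_cases hk : k = PySem.Str.lower n
      · have hb : (PySem.Str.lower n == k) = true := beq_iff_eq.mpr hk.symm
        rw [hk, PySem.Dict.get?_setdefault_self]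
        cases hd : d.get? (PySem.Str.lower n) <;> simp [List.find?, ← hk]
      · have hb : (PySem.Str.lower n == k) = false :=
          beq_eq_false_iff_ne.mpr (fun h => hk h.symm)
        rw [PySem.Dict.get?_setdefault_of_ne (hne := hk)]
        simp [List.find?, hb]
  rw [main names PySem.Dict.empty]
  simp

-- the single pass equals A's two loops, for any remembered fallback, whenever
-- A's map and B's map agree as lookup tables
theorem pv_main (S : PySem.Set String) (lmA lmB : PySem.Dict String String)
    (hlook : ∀ k, lmA.get? k = lmB.get? k)
    (cs : List String) (acc : Option String) :
    pvGoB S lmB acc cs =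
      match pvLoopExact S cs with
      | some c => some c
      | none =>
        match acc with
        | some v => some v
        | none => pvLoopCI lmA cs := by
  induction cs generalizing acc with
  | nil => cases acc <;> simp [pvGoB, pvLoopExact, pvLoopCI]
  | cons c rest ih =>
    simp only [pvGoB, pvLoopExact, pvLoopCI]
    by_cases hc : S.contains c = true
    · rw [if_pos hc, if_pos hc]
    · rw [if_neg hc, if_neg hc, ih]
      cases acc with
      | some v => cases pvLoopExact S rest <;> rfl
      | none => rw [hlook (PySem.Str.lower c)]

-- ===== VERDICT (by name: the statement is the Claim_ definition above) =====
theorem pick_tool_name_spec : Claim_equal_pick_tool_name := by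
  intro tools candidates _ hpre
  unfold Spec_pick_tool_name pick_tool_name pick_tool_name_alt
  set names := tools.map (fun t => (PySem.Dict.mk t).getD "name" "") with hnames
  have hp : ∀ a ∈ names, ∀ b ∈ names, PySem.Str.lower a = PySem.Str.lower b → a = b := hpre
  have hlook : ∀ k, (pvLowerMap (PySem.Set.ofList names)).get? k = (pvByLower names).get? k := by
    intro k; rw [pv_lookup_eq names hp k, pv_get?_bylower names k]
  rw [pv_main (PySem.Set.ofList names) (pvLowerMap (PySem.Set.ofList names)) (pvByLower names) hlook candidates none]
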